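-- pv_equiv track=rewrite | github.com/lybfish/ironbull | services/signal-hub/app/signal_standard.py | canonicalize_symbol
-- ===== SOURCE A (Python) =====
-- def canonicalize_symbol(symbol: str) -> str:
--     if not symbol:
--         return symbol
--     if "/" in symbol:
--         return symbol
--     upper = symbol.upper()
--     for quote in ("USDT", "USD", "BTC", "ETH"):
--         if upper.endswith(quote) and len(upper) > len(quote):
--             base = upper[: -len(quote)]
--             return f"{base}/{quote}"
--     return upper
-- ===== SOURCE B (Python) =====
-- _QUOTES = {"USDT", "USD", "BTC", "ETH"}
-- _QLENS = {len(q) for q in _QUOTES}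
--
--
-- def canonicalize_symbol(symbol: str) -> str:
--     if not symbol or "/" in symbol:
--         return symbol
--     upper = symbol.upper()
--     for i in range(1, len(upper)):
--         if len(upper) - i in _QLENS and upper[i:] in _QUOTES:
--             return f"{upper[:i]}/{upper[i:]}"
--     return upper
-- ===== Notes on version B (the rewrite author's own statement) =====
-- stated objective: alternative
-- what changed: Instead of iterating over the four candidate quote strings and testing each with endswith, B scans split positions i = 1..len-1 and returns at the first i whose tail length is a quote length and whose tail upper[i:] lies in a quote set; correct because at most one split position can match (no quote is a proper suffix of another's tail) and ascending i checks the longer suffix (USDT) first, matching A's priority.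
import Mathlib
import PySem

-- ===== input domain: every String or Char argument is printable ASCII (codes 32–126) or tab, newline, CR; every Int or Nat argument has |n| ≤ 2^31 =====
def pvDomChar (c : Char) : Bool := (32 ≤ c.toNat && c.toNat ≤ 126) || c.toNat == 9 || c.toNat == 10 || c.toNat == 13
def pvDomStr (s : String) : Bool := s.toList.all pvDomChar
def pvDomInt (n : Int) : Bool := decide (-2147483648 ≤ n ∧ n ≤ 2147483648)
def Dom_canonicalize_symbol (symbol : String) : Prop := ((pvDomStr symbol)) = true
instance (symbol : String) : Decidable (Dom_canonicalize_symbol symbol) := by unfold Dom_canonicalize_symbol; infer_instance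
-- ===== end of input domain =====

-- B scans split positions of the uppercased symbol and tests each tail for membership in a
-- quote set, instead of A's loop over the four quote strings with endswith (objective:
-- alternative, same cost).


-- ===== PORT A =====
-- the 'for quote in ("USDT","USD","BTC","ETH")' loop with its early return
def canonQuoteLoop (upper : List Char) : List (List Char) → List Char
  | [] => upper
  | q :: rest =>
    if PySem.Chars.endswith upper q && decide (q.length < PySem.Chars.len upper) then
      -- base = upper[:-len(quote)]; return f"{base}/{quote}"
      PySem.Chars.slice upper none (some (-(q.length : Int))) ++ '/' :: q
    else canonQuoteLoop upper rest

def canonicalize_symbol (symbol : String) : String :=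
  if symbol = "" then symbol
  else if PySem.Str.isIn "/" symbol then symbol
  else
    String.ofList
      (canonQuoteLoop (PySem.Str.upper symbol).toList
        ["USDT".toList, "USD".toList, "BTC".toList, "ETH".toList])

-- ===== PORT B =====
-- _QUOTES = {"USDT", "USD", "BTC", "ETH"}
def pvQuotes : PySem.Set (List Char) :=
  PySem.Set.ofList ["USDT".toList, "USD".toList, "BTC".toList, "ETH".toList]

-- _QLENS = {len(q) for q in _QUOTES}
def pvQLens : PySem.Set Int := PySem.Set.ofList (pvQuotes.map (fun q => (q.length : Int)))

-- the 'for i in range(1, len(upper))' loop with its early return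
def splitScan (u : List Char) : List Int → List Char
  | [] => u
  | i :: rest =>
    if ((u.length : Int) - i) ∈ pvQLens ∧ PySem.Chars.slice u (some i) none ∈ pvQuotes then
      PySem.Chars.slice u none (some i) ++ '/' :: PySem.Chars.slice u (some i) none
    else splitScan u rest

def canonicalize_symbol_alt (symbol : String) : String :=
  if symbol = "" || PySem.Str.isIn "/" symbol then symbol
  else
    let u := (PySem.Str.upper symbol).toList
    String.ofList (splitScan u (PySem.List.pyRange 1 (u.length : Int) 1))

-- ===== PRECONDITION & SPEC =====
def Spec_canonicalize_symbol (symbol : String) (out : String) : Prop := out = canonicalize_symbol_alt symbol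
instance (symbol : String) (out : String) : Decidable (Spec_canonicalize_symbol symbol out) := by unfold Spec_canonicalize_symbol; infer_instance

-- ===== CLAIM (what is proved, stated in full; the proofs are below) =====
def Claim_equal_canonicalize_symbol : Prop := ∀ (symbol : String), Dom_canonicalize_symbol symbol → Spec_canonicalize_symbol symbol (canonicalize_symbol symbol)

-- ===== LEMMAS AND PROOFS =====

-- the normal form both loops are reduced to
def pvMid (u : List Char) : List Char :=
  if 4 < u.length ∧ u.drop (u.length - 4) = "USDT".toList then
    u.take (u.length - 4) ++ '/' :: u.drop (u.length - 4)
  else if 3 < u.length ∧ u.drop (u.length - 3) ∈ ["USD".toList, "BTC".toList, "ETH".toList] then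
    u.take (u.length - 3) ++ '/' :: u.drop (u.length - 3)
  else u

theorem suffix_iff_drop (q u : List Char) (h : q.length ≤ u.length) :
    q <:+ u ↔ u.drop (u.length - q.length) = q := by
  constructor
  · rintro ⟨t, rfl⟩
    simp
  · intro hd
    refine ⟨u.take (u.length - q.length), ?_⟩
    rw [← hd]
    simp only [List.length_drop, Nat.sub_sub_self (Nat.sub_le _ _), List.take_append_drop]

theorem cond_iff (u q : List Char) (k : Nat) (hk : q.length = k) :
    ((PySem.Chars.endswith u q && decide (q.length < PySem.Chars.len u)) = true) ↔
      (k < u.length ∧ u.drop (u.length - k) = q) := by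
  subst hk
  simp only [Bool.and_eq_true, decide_eq_true_eq, PySem.Chars.endswith_iff, PySem.Chars.len_eq,
    Nat.cast_lt]
  constructor
  · rintro ⟨hs, hl⟩
    exact ⟨hl, (suffix_iff_drop _ _ hl.le).1 hs⟩
  · rintro ⟨hl, hd⟩
    exact ⟨(suffix_iff_drop _ _ hl.le).2 hd, hl⟩

theorem body_eq (u q : List Char) (k : Nat) (hk : q.length = k) (h0 : 0 < k)
    (hd : u.drop (u.length - k) = q) :
    PySem.Chars.slice u none (some (-(q.length : Int))) ++ '/' :: q =
      u.take (u.length - k) ++ '/' :: u.drop (u.length - k) := by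
  subst hk
  rw [PySem.Chars.slice_eq_listSlice, PySem.List.slice_to_neg_natCast u q.length h0, hd]

theorem core_eq (u : List Char) :
    canonQuoteLoop u ["USDT".toList, "USD".toList, "BTC".toList, "ETH".toList] = pvMid u := by
  unfold pvMid
  simp only [canonQuoteLoop]
  simp only [cond_iff u "USDT".toList 4 (by decide), cond_iff u "USD".toList 3 (by decide),
    cond_iff u "BTC".toList 3 (by decide), cond_iff u "ETH".toList 3 (by decide)]
  by_cases h4 : 4 < u.length ∧ u.drop (u.length - 4) = "USDT".toList
  · rw [if_pos h4, if_pos h4]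
    exact body_eq u "USDT".toList 4 (by decide) (by omega) h4.2
  · rw [if_neg h4, if_neg h4]
    by_cases hu : 3 < u.length ∧ u.drop (u.length - 3) = "USD".toList
    · rw [if_pos hu, if_pos ⟨hu.1, by simp [hu.2]⟩]
      exact body_eq u "USD".toList 3 (by decide) (by omega) hu.2
    · rw [if_neg hu]
      by_cases hb : 3 < u.length ∧ u.drop (u.length - 3) = "BTC".toList
      · rw [if_pos hb, if_pos ⟨hb.1, by simp [hb.2]⟩]
        exact body_eq u "BTC".toList 3 (by decide) (by omega) hb.2
      · rw [if_neg hb]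
        by_cases he : 3 < u.length ∧ u.drop (u.length - 3) = "ETH".toList
        · rw [if_pos he, if_pos ⟨he.1, by simp [he.2]⟩]
          exact body_eq u "ETH".toList 3 (by decide) (by omega) he.2
        · rw [if_neg he, if_neg (by
            rintro ⟨hl, hm⟩
            simp only [List.mem_cons, List.not_mem_nil, or_false] at hm
            rcases hm with hm | hm | hm
            · exact hu ⟨hl, hm⟩
            · exact hb ⟨hl, hm⟩
            · exact he ⟨hl, hm⟩)]

theorem pvQuotes_eq :
    pvQuotes = ["USDT".toList, "USD".toList, "BTC".toList, "ETH".toList] := by decide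

theorem pvQLens_eq : pvQLens = [4, 3] := by decide

-- B-side: which drops lie in the quote set
theorem drop_mem_quotes (u : List Char) (k : Nat) :
    u.drop k ∈ pvQuotes ↔
      (4 ≤ u.length ∧ k = u.length - 4 ∧ u.drop (u.length - 4) = "USDT".toList) ∨
      (3 ≤ u.length ∧ k = u.length - 3 ∧ u.drop (u.length - 3) ∈
        ["USD".toList, "BTC".toList, "ETH".toList]) := by
  constructor
  · intro h
    rw [pvQuotes_eq] at h
    simp only [List.mem_cons, List.not_mem_nil, or_false] at h
    rcases h with h | h | h | h
    · have hl : u.length - k = 4 := by rw [← List.length_drop, h]; rfl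
      exact Or.inl ⟨by omega, by omega, by rw [show u.length - 4 = k by omega]; exact h⟩
    · have hl : u.length - k = 3 := by rw [← List.length_drop, h]; rfl
      exact Or.inr ⟨by omega, by omega, by rw [show u.length - 3 = k by omega]; simp [h]⟩
    · have hl : u.length - k = 3 := by rw [← List.length_drop, h]; rfl
      exact Or.inr ⟨by omega, by omega, by rw [show u.length - 3 = k by omega]; simp [h]⟩
    · have hl : u.length - k = 3 := by rw [← List.length_drop, h]; rfl
      exact Or.inr ⟨by omega, by omega, by rw [show u.length - 3 = k by omega]; simp [h]⟩
  · rintro (⟨h1, h2, h3⟩ | ⟨h1, h2, h3⟩)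
    · subst h2; rw [pvQuotes_eq]; simp [h3]
    · subst h2
      simp only [List.mem_cons, List.not_mem_nil, or_false] at h3
      rw [pvQuotes_eq]
      simp only [List.mem_cons, List.not_mem_nil, or_false]
      tauto

theorem splitScan_skip (u : List Char) (l1 l2 : List Int)
    (h : ∀ i ∈ l1, PySem.Chars.slice u (some i) none ∉ pvQuotes) :
    splitScan u (l1 ++ l2) = splitScan u l2 := by
  induction l1 with
  | nil => rfl
  | cons a t ih =>
    simp only [List.cons_append, splitScan]
    rw [if_neg (fun hc => h a List.mem_cons_self hc.2),
      ih (fun i hi => h i (List.mem_cons_of_mem a hi))]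

theorem splitScan_none (u : List Char) (l : List Int)
    (h : ∀ i ∈ l, PySem.Chars.slice u (some i) none ∉ pvQuotes) :
    splitScan u l = u := by
  induction l with
  | nil => rfl
  | cons a t ih =>
    simp only [splitScan]
    rw [if_neg (fun hc => h a List.mem_cons_self hc.2),
      ih (fun i hi => h i (List.mem_cons_of_mem a hi))]

theorem slice_from_nonneg (u : List Char) (i : Int) (h : 0 ≤ i) :
    PySem.Chars.slice u (some i) none = u.drop i.toNat := by
  rw [PySem.Chars.slice_eq_listSlice, PySem.List.slice_from u h]

theorem alt_core (u : List Char) :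
    splitScan u (PySem.List.pyRange 1 (u.length : Int) 1) = pvMid u := by
  unfold pvMid
  by_cases h4 : 4 < u.length ∧ u.drop (u.length - 4) = "USDT".toList
  · rw [if_pos h4]
    rw [PySem.List.pyRange_one_append 1 ((u.length : Int) - 4) (u.length : Int)
          (by omega) (by omega),
        splitScan_skip u _ _ ?_]
    · rw [PySem.List.pyRange_one_cons (by omega)]
      simp only [splitScan]
      have hs : PySem.Chars.slice u (some ((u.length : Int) - 4)) none = u.drop (u.length - 4) := by
        rw [slice_from_nonneg u _ (by omega)]; congr 1; omega
      rw [if_pos ⟨by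
          rw [show (u.length : Int) - ((u.length : Int) - 4) = 4 by ring, pvQLens_eq]
          simp, by
          rw [hs, drop_mem_quotes]
          exact Or.inl ⟨by omega, rfl, h4.2⟩⟩]
      rw [hs, PySem.Chars.slice_eq_listSlice, PySem.List.slice_to u (by omega : (0:Int) ≤ (u.length : Int) - 4)]
      congr 2
      omega
    · intro i hi hmem
      rw [PySem.List.mem_pyRange_one] at hi
      rw [slice_from_nonneg u i (by omega), drop_mem_quotes] at hmem
      rcases hmem with ⟨_, hk, _⟩ | ⟨_, hk, _⟩ <;> omega
  · rw [if_neg h4]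
    by_cases h3 : 3 < u.length ∧ u.drop (u.length - 3) ∈ ["USD".toList, "BTC".toList, "ETH".toList]
    · rw [if_pos h3]
      rw [PySem.List.pyRange_one_append 1 ((u.length : Int) - 3) (u.length : Int)
            (by omega) (by omega),
          splitScan_skip u _ _ ?_]
      · rw [PySem.List.pyRange_one_cons (by omega)]
        simp only [splitScan]
        have hs : PySem.Chars.slice u (some ((u.length : Int) - 3)) none = u.drop (u.length - 3) := by
          rw [slice_from_nonneg u _ (by omega)]; congr 1; omega
        rw [if_pos ⟨by
            rw [show (u.length : Int) - ((u.length : Int) - 3) = 3 by ring, pvQLens_eq]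
            simp, by
            rw [hs, drop_mem_quotes]
            exact Or.inr ⟨by omega, rfl, h3.2⟩⟩]
        rw [hs, PySem.Chars.slice_eq_listSlice, PySem.List.slice_to u (by omega : (0:Int) ≤ (u.length : Int) - 3)]
        congr 2
        omega
      · intro i hi hmem
        rw [PySem.List.mem_pyRange_one] at hi
        rw [slice_from_nonneg u i (by omega), drop_mem_quotes] at hmem
        rcases hmem with ⟨hn, hk, hd⟩ | ⟨_, hk, _⟩
        · exact h4 ⟨by omega, hd⟩
        · omega
    · rw [if_neg h3]
      apply splitScan_none
      intro i hi hmem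
      rw [PySem.List.mem_pyRange_one] at hi
      rw [slice_from_nonneg u i (by omega), drop_mem_quotes] at hmem
      rcases hmem with ⟨hn, hk, hd⟩ | ⟨hn, hk, hd⟩
      · exact h4 ⟨by omega, hd⟩
      · exact h3 ⟨by omega, hd⟩

-- ===== VERDICT (by name: the statement is the Claim_ definition above) =====
theorem canonicalize_symbol_spec : Claim_equal_canonicalize_symbol := by
  intro symbol _
  unfold Spec_canonicalize_symbol canonicalize_symbol canonicalize_symbol_alt
  by_cases he : symbol = ""
  · simp [he]
  · rw [if_neg he]
    by_cases hs : PySem.Str.isIn "/" symbol = true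
    · rw [if_pos hs, if_pos (by simp only [Bool.or_eq_true, decide_eq_true_eq]; exact Or.inr hs)]
    · rw [if_neg hs, if_neg (by simp [he]; simpa using hs), core_eq]
      exact congrArg String.ofList (alt_core _).symm
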